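-- pv_equiv track=rewrite | github.com/binglel/vad_lrt_hmm | vad_pro_v2.1.py | vad_start_end
-- ===== SOURCE A (Python) =====
-- def get_index1(lst=None, item=''):
--     return [index for (index,value) in enumerate(lst) if value == item]
--
-- def vad_start_end(result_raw):
--     index = get_index1(result_raw,1)
--     # print index
--     list = []
--     list.append(index[0])
--     for i in range(len(index) - 1):
--         if (index[i + 1] - index[i]) != 1:
--             list.append(index[i])
--             list.append(index[i + 1])
--     list.append(index[len(index) - 1])
--     return list
-- ===== SOURCE B (Python) =====
-- def vad_start_end(result_raw):
--     start = result_raw.index(1)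
--     out = [start]
--     for i in range(start + 1, len(result_raw)):
--         if result_raw[i] == 1 and result_raw[i - 1] != 1:
--             out.append(i)              # a new run begins
--         if result_raw[i] != 1 and result_raw[i - 1] == 1:
--             out.append(i - 1)          # the current run ends
--     if result_raw[-1] == 1:
--         out.append(len(result_raw) - 1)
--     return out
-- ===== Notes on version B (the rewrite author's own statement) =====
-- stated objective: alternative
-- what changed: B locates the first 1 with list.index and then scans the array once comparing each element with its predecessor to emit run starts and ends, instead of A's two-phase approach of first materialising the full index list of 1s and then scanning adjacent index pairs for gaps; Pre_ excludes inputs with no 1 in them, on which A raises IndexError (B raises ValueError there).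
import Mathlib
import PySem

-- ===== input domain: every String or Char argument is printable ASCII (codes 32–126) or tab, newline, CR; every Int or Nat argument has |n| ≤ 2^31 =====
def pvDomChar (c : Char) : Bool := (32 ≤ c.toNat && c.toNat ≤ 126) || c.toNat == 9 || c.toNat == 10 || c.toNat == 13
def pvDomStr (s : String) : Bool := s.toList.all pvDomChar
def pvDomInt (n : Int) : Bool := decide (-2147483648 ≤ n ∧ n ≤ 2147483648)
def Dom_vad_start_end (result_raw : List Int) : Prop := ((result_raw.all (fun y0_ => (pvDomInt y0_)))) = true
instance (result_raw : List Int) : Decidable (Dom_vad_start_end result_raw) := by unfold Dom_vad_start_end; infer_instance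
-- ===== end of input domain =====

-- B finds the first 1 with list.index and then makes one forward scan comparing each element with its
-- predecessor (run start on a 0->1 step, run end on a 1->0 step, trailing end if the array ends in 1),
-- instead of A's two-phase scan of a precomputed index list; same cost, different decomposition.

-- ===== PORT A =====
-- [index for (index, value) in enumerate(lst) if value == item]
def get_index1 (lst : List Int) (item : Int) : List Int :=
  (PySem.List.enumerate lst 0).filterMap (fun p => if p.2 = item then some p.1 else none)

def vad_start_end (result_raw : List Int) : List Int :=
  let index := get_index1 result_raw 1
  let l : List Int := []
  let l := l ++ [PySem.List.pyGetD index 0 0]              -- index[0]; raises IndexError when no 1s (excluded by Pre_)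
  let l := (PySem.List.pyRange 0 ((index.length : Int) - 1) 1).foldl
    (fun acc i =>
      if PySem.List.pyGetD index (i + 1) 0 - PySem.List.pyGetD index i 0 ≠ 1 then
        acc ++ [PySem.List.pyGetD index i 0] ++ [PySem.List.pyGetD index (i + 1) 0]
      else acc) l
  l ++ [PySem.List.pyGetD index ((index.length : Int) - 1) 0]

-- ===== PORT B =====
def vad_start_end_alt (result_raw : List Int) : List Int :=
  match PySem.List.index? result_raw 1 with
  | none => []                                             -- result_raw.index(1) raises ValueError here (excluded by Pre_)
  | some k =>
    let start : Int := (k : Int)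
    let out : List Int := [start]
    let out := (PySem.List.pyRange (start + 1) ((result_raw.length : Int)) 1).foldl
      (fun acc i =>
        let acc := if PySem.List.pyGetD result_raw i 0 = 1 ∧ PySem.List.pyGetD result_raw (i - 1) 0 ≠ 1 then acc ++ [i] else acc
        let acc := if PySem.List.pyGetD result_raw i 0 ≠ 1 ∧ PySem.List.pyGetD result_raw (i - 1) 0 = 1 then acc ++ [i - 1] else acc
        acc) out
    if PySem.List.pyGetD result_raw (-1) 0 = 1 then out ++ [(result_raw.length : Int) - 1] else out

-- ===== PRECONDITION & SPEC =====
-- Pre_ excludes exactly the inputs with no 1 in them, on which A raises IndexError (index[0] of an empty list).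
def Pre_vad_start_end (result_raw : List Int) : Prop := (1 : Int) ∈ result_raw
instance (result_raw : List Int) : Decidable (Pre_vad_start_end result_raw) := by unfold Pre_vad_start_end; infer_instance
def pvWitness_vad_start_end : List Int := [0, 1, 1, 0, 1]

def Spec_vad_start_end (result_raw : List Int) (out : List Int) : Prop := out = vad_start_end_alt result_raw
instance (result_raw : List Int) (out : List Int) : Decidable (Spec_vad_start_end result_raw out) := by unfold Spec_vad_start_end; infer_instance

-- ===== CLAIM (what is proved, stated in full; the proofs are below) =====
def Claim_equal_vad_start_end : Prop := ∀ (result_raw : List Int), Dom_vad_start_end result_raw → Pre_vad_start_end result_raw → Spec_vad_start_end result_raw (vad_start_end result_raw)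
-- ===== LEMMAS AND PROOFS =====

-- indices (from offset i) of the elements equal to 1
def idx1 : List Int → Int → List Int
  | [], _ => []
  | v :: t, i => if v = 1 then i :: idx1 t (i + 1) else idx1 t (i + 1)

-- reference predecessor-scan recursion (B's loop, recursively: i is the current position, prev the previous element)
def G : List Int → Int → Option Int → List Int
  | [], i, prev => if prev = some 1 then [i - 1] else []
  | v :: t, i, prev =>
      (if v = 1 ∧ prev ≠ some 1 then [i] else []) ++
      (if v ≠ 1 ∧ prev = some 1 then [i - 1] else []) ++ G t (i + 1) (some v)

-- interleaved boundaries from a (strictly increasing) index list, run currently open with last index cur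
def E (cur : Int) : List Int → List Int
  | [] => [cur]
  | y :: rest => if y - cur ≠ 1 then cur :: y :: E y rest else E y rest

def F : List Int → List Int
  | [] => []
  | x :: rest => x :: E x rest

-- adjacent-gap pairs of an index list (A's middle loop, recursively)
def gp : List Int → List Int
  | [] => []
  | [_] => []
  | x :: y :: t => (if y - x ≠ 1 then [x, y] else []) ++ gp (y :: t)

theorem idx1_mem_ge : ∀ (t : List Int) (i x : Int), x ∈ idx1 t i → i ≤ x := by
  intro t
  induction t with
  | nil => intro i x h; simp [idx1] at h
  | cons v t ih =>
    intro i x h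
    simp only [idx1] at h
    split at h
    · rcases List.mem_cons.mp h with h | h
      · omega
      · have := ih (i + 1) x h; omega
    · have := ih (i + 1) x h; omega

theorem get_index1_eq_idx1 : ∀ (l : List Int) (i : Int),
    (PySem.List.enumerate l i).filterMap (fun p => if p.2 = 1 then some p.1 else none) = idx1 l i := by
  intro l
  induction l with
  | nil => intro i; simp [PySem.List.enumerate_nil, idx1]
  | cons v t ih =>
    intro i
    simp only [PySem.List.enumerate_cons, List.filterMap_cons, idx1]
    by_cases h : v = 1 <;> simp [h, ih]

theorem gp_E : ∀ (rest : List Int) (x : Int),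
    gp (x :: rest) ++ [(x :: rest).getLast (by simp)] = E x rest := by
  intro rest
  induction rest with
  | nil => intro x; simp [gp, E]
  | cons y t ih =>
    intro x
    simp only [gp, E]
    by_cases h : y - x ≠ 1 <;> simp [h, ← ih y, List.getLast_cons]

theorem G_eq_F : ∀ (t : List Int),
    (∀ (i : Int) (prev : Option Int), prev ≠ some 1 → G t i prev = F (idx1 t i)) ∧
    (∀ i : Int, G t (i + 1) (some 1) = E i (idx1 t (i + 1))) := by
  intro t
  induction t with
  | nil =>
    constructor
    · intro i prev h; simp [G, F, idx1, h]
    · intro i; simp [G, E, idx1]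
  | cons v t ih =>
    obtain ⟨ih1, ih2⟩ := ih
    constructor
    · intro i prev hprev
      by_cases hv : v = 1
      · subst hv
        simp [G, idx1, hprev, F, ih2 i]
      · simp [G, idx1, hv, hprev, ih1 (i + 1) (some v) (by simp [hv])]
    · intro i
      by_cases hv : v = 1
      · subst hv
        simp [G, idx1, E, ih2 (i + 1)]
      · have hG : G (v :: t) (i + 1) (some 1) = [i] ++ G t (i + 1 + 1) (some v) := by
          simp [G, hv, show i + 1 - 1 = i from by ring]
        rw [hG, ih1 (i + 1 + 1) (some v) (by simp [hv])]
        have hidx1 : idx1 (v :: t) (i + 1) = idx1 t (i + 1 + 1) := by simp [idx1, hv]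
        rw [hidx1]
        rcases hidx : idx1 t (i + 1 + 1) with _ | ⟨y, rest⟩
        · simp [E, F]
        · have hy : i + 1 + 1 ≤ y := idx1_mem_ge t _ y (by rw [hidx]; simp)
          simp [E, F, show y - i ≠ 1 from by omega]

-- with no 1 in the prefix, idx1 skips it (shifting the offset)
theorem idx1_append_not_one : ∀ (pre : List Int) (t : List Int) (i : Int), (1 : Int) ∉ pre →
    idx1 (pre ++ t) i = idx1 t (i + (pre.length : Int)) := by
  intro pre
  induction pre with
  | nil => intro t i _; simp
  | cons v p ih =>
    intro t i h
    have hv : v ≠ 1 := fun hv => h (by simp [hv])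
    have h2 : (1 : Int) ∉ p := fun hm => h (by simp [hm])
    show idx1 (v :: (p ++ t)) i = idx1 t (i + ((v :: p).length : Int))
    rw [show idx1 (v :: (p ++ t)) i = idx1 (p ++ t) (i + 1) from by simp [idx1, hv]]
    rw [ih t (i + 1) h2]
    rw [show i + 1 + (p.length : Int) = i + ((v :: p).length : Int) from by
      simp only [List.length_cons]; push_cast; ring]

-- B's predecessor-scan loop (from position a ≥ 1) plus the trailing last-element check equals G on the suffix
theorem Bscan : ∀ (n : Nat) (l : List Int) (a : Nat) (acc : List Int)
    (_h1 : 1 ≤ a) (h2 : a ≤ l.length) (_hn : l.length - a ≤ n) (ha : a - 1 < l.length),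
    (if PySem.List.pyGetD l (-1) 0 = 1 then
      ((PySem.List.pyRange (a : Int) ((l.length : Int)) 1).foldl
        (fun acc i =>
          let acc := if PySem.List.pyGetD l i 0 = 1 ∧ PySem.List.pyGetD l (i - 1) 0 ≠ 1 then acc ++ [i] else acc
          let acc := if PySem.List.pyGetD l i 0 ≠ 1 ∧ PySem.List.pyGetD l (i - 1) 0 = 1 then acc ++ [i - 1] else acc
          acc) acc) ++ [(l.length : Int) - 1]
     else
      (PySem.List.pyRange (a : Int) ((l.length : Int)) 1).foldl
        (fun acc i =>
          let acc := if PySem.List.pyGetD l i 0 = 1 ∧ PySem.List.pyGetD l (i - 1) 0 ≠ 1 then acc ++ [i] else acc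
          let acc := if PySem.List.pyGetD l i 0 ≠ 1 ∧ PySem.List.pyGetD l (i - 1) 0 = 1 then acc ++ [i - 1] else acc
          acc) acc)
    = acc ++ G (l.drop a) (a : Int) (some (l[a - 1]'ha)) := by
  intro n
  induction n with
  | zero =>
    intro l a acc h1 h2 hn ha
    have he : a = l.length := by omega
    have hne : l ≠ [] := by intro h; subst h; simp at h2; omega
    rw [PySem.List.pyRange_one_eq_nil (by omega)]
    have hlast : PySem.List.pyGetD l (-1) 0 = l[a - 1]'ha := by
      rw [PySem.List.pyGetD_neg_one l 0 hne, List.getLast_eq_getElem]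
      subst he; rfl
    rw [List.drop_eq_nil_of_le (by omega)]
    simp only [List.foldl_nil, G, hlast]
    have hca : ((l.length : Int)) = (a : Int) := by rw [he]
    by_cases hv : l[a - 1]'ha = 1
    · simp [hv, hca]
    · simp [hv]
  | succ n ih =>
    intro l a acc h1 h2 hn ha
    by_cases hlt : a < l.length
    · rw [PySem.List.pyRange_one_cons (by omega), List.foldl_cons]
      have hga : PySem.List.pyGetD l (a : Int) 0 = l[a] := by
        rw [PySem.List.pyGetD_natCast]; simp [List.getD, hlt]
      have hga1 : PySem.List.pyGetD l ((a : Int) - 1) 0 = l[a - 1]'ha := by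
        have hc : ((a : Int) - 1) = ((a - 1 : Nat) : Int) := by omega
        rw [hc, PySem.List.pyGetD_natCast]; simp [List.getD, ha]
      dsimp only
      rw [hga, hga1]
      rw [show ((a : Int) + 1) = ((a + 1 : Nat) : Int) from by push_cast; ring]
      rw [ih l (a + 1) _ (by omega) (by omega) (by omega) (by omega)]
      have hdrop : l.drop a = l[a] :: l.drop (a + 1) := List.drop_eq_getElem_cons hlt
      rw [hdrop]
      have hidx : l[a + 1 - 1]'(by omega) = l[a] := rfl
      rw [show ((a + 1 : Nat) : Int) = (a : Int) + 1 from by push_cast; ring]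
      simp only [G, hidx]
      by_cases hx : l[a] = 1 <;> by_cases hp : (l[a - 1]'ha) = 1 <;>
        simp [hx, hp]
    · have he : a = l.length := by omega
      have hne : l ≠ [] := by intro h; subst h; simp at h2; omega
      rw [PySem.List.pyRange_one_eq_nil (by omega)]
      have hlast : PySem.List.pyGetD l (-1) 0 = l[a - 1]'ha := by
        rw [PySem.List.pyGetD_neg_one l 0 hne, List.getLast_eq_getElem]
        subst he; rfl
      rw [List.drop_eq_nil_of_le (by omega)]
      simp only [List.foldl_nil, G, hlast]
      have hca : ((l.length : Int)) = (a : Int) := by rw [he]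
      by_cases hv : l[a - 1]'ha = 1
      · simp [hv, hca]
      · simp [hv]

-- A's middle fold equals gp (generalised over the start index a)
theorem A_fold_eq_gp : ∀ (n : Nat) (xs : List Int) (a : Nat) (acc : List Int),
    xs.length - a ≤ n →
    (PySem.List.pyRange (a : Int) ((xs.length : Int) - 1) 1).foldl
      (fun acc i =>
        if PySem.List.pyGetD xs (i + 1) 0 - PySem.List.pyGetD xs i 0 ≠ 1 then
          acc ++ [PySem.List.pyGetD xs i 0] ++ [PySem.List.pyGetD xs (i + 1) 0]
        else acc) acc = acc ++ gp (xs.drop a) := by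
  intro n
  induction n with
  | zero =>
    intro xs a acc h
    have h1 : xs.length ≤ a := by omega
    rw [PySem.List.pyRange_one_eq_nil (by omega)]
    rw [List.drop_eq_nil_of_le h1]
    simp [gp]
  | succ n ih =>
    intro xs a acc h
    by_cases hlt : (a : Int) < (xs.length : Int) - 1
    · have ha1 : a + 1 < xs.length := by omega
      have ha : a < xs.length := by omega
      rw [PySem.List.pyRange_one_cons hlt, List.foldl_cons]
      have hget : PySem.List.pyGetD xs (a : Int) 0 = xs[a] := by
        rw [PySem.List.pyGetD_natCast]; simp [List.getD, ha]
      have hget1 : PySem.List.pyGetD xs ((a : Int) + 1) 0 = xs[a + 1] := by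
        have : ((a : Int) + 1) = ((a + 1 : Nat) : Int) := by push_cast; ring
        rw [this, PySem.List.pyGetD_natCast]; simp [List.getD, ha1]
      have hdrop : xs.drop a = xs[a] :: xs[a + 1] :: xs.drop (a + 2) := by
        rw [List.drop_eq_getElem_cons ha, List.drop_eq_getElem_cons ha1]
      have hcast : ((a : Int) + 1) = ((a + 1 : Nat) : Int) := by push_cast; ring
      rw [hget, hget1, hcast, ih xs (a + 1) _ (by omega)]
      rw [hdrop]
      have hdrop1 : xs.drop (a + 1) = xs[a + 1] :: xs.drop (a + 2) := by
        rw [List.drop_eq_getElem_cons ha1]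
      rw [hdrop1]
      simp only [gp, ← hdrop1]
      by_cases hne : xs[a + 1] - xs[a] ≠ 1 <;> simp [hne]
    · rw [PySem.List.pyRange_one_eq_nil (by omega)]
      have : xs.length - a ≤ 1 := by omega
      rcases hd : xs.drop a with _ | ⟨z, zs⟩
      · simp [gp]
      · have : zs = [] := by
          have := List.length_drop (l := xs) (i := a)
          rw [hd] at this; simp at this
          cases zs with
          | nil => rfl
          | cons _ _ => simp at this; omega
        subst this
        simp [gp]

theorem get_index1_one (l : List Int) : get_index1 l 1 = idx1 l 0 := by
  unfold get_index1; exact get_index1_eq_idx1 l 0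

theorem A_fold_eq_gp0 (xs : List Int) (acc : List Int) :
    (PySem.List.pyRange 0 ((xs.length : Int) - 1) 1).foldl
      (fun acc i =>
        if PySem.List.pyGetD xs (i + 1) 0 - PySem.List.pyGetD xs i 0 ≠ 1 then
          acc ++ [PySem.List.pyGetD xs i 0] ++ [PySem.List.pyGetD xs (i + 1) 0]
        else acc) acc = acc ++ gp xs := by
  have h := A_fold_eq_gp xs.length xs 0 acc (by omega)
  simpa using h

theorem getLast_eq_pyGetD (xs : List Int) (h : xs ≠ []) :
    PySem.List.pyGetD xs ((xs.length : Int) - 1) 0 = xs.getLast h := by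
  have hlen : 1 ≤ xs.length := List.length_pos_of_ne_nil h
  have hc : ((xs.length : Int) - 1) = ((xs.length - 1 : Nat) : Int) := by omega
  have hlt : xs.length - 1 < xs.length := by omega
  rw [hc, PySem.List.pyGetD_natCast, List.getLast_eq_getElem]
  simp [List.getD_eq_getElem?_getD, List.getElem?_eq_getElem hlt]

theorem A_assemble (x : Int) (rest : List Int) :
    [x] ++ gp (x :: rest) ++ [PySem.List.pyGetD (x :: rest) (((x :: rest).length : Int) - 1) 0]
      = F (x :: rest) := by
  rw [getLast_eq_pyGetD (x :: rest) (by simp)]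
  simp [F, ← gp_E rest x]

-- ===== VERDICT (by name: the statement is the Claim_ definition above) =====
theorem vad_start_end_spec : Claim_equal_vad_start_end := by
  unfold Claim_equal_vad_start_end
  intro l _ hpre
  unfold Spec_vad_start_end
  obtain ⟨k, hk⟩ := Option.isSome_iff_exists.mp ((PySem.List.index?_isSome_iff l 1).mpr hpre)
  obtain ⟨hklen, hgetk, _⟩ := PySem.List.getElem_of_index?_eq_some hk
  obtain ⟨pre, suf, hdec, hlen, hnot⟩ := (PySem.List.index?_eq_some_iff l 1 k).mp hk
  -- B's side: index? hit at k, then the predecessor scan from k+1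
  dsimp only [vad_start_end, vad_start_end_alt]
  rw [hk]
  dsimp only
  have hcast : ((k : Int) + 1) = ((k + 1 : Nat) : Int) := by push_cast; ring
  rw [hcast]
  have hB := Bscan l.length l (k + 1) [(k : Int)] (by omega) (by omega) (by omega) (by omega)
  dsimp only at hB
  rw [hB]
  have hidxk : l[k + 1 - 1]'(by omega) = (1 : Int) := hgetk
  rw [hidxk, ← hcast, (G_eq_F (l.drop (k + 1))).2 (k : Int)]
  -- A's side: the index list decomposes as k :: (indices of 1 in the suffix)
  have hidx : idx1 l 0 = (k : Int) :: idx1 suf ((k : Int) + 1) := by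
    rw [hdec, idx1_append_not_one pre (1 :: suf) 0 hnot]
    simp [idx1, hlen]
  have hdrop : l.drop (k + 1) = suf := by
    rw [hdec, ← hlen]
    rw [show pre.length + 1 = (pre ++ [(1 : Int)]).length by simp]
    rw [show pre ++ (1 : Int) :: suf = (pre ++ [(1 : Int)]) ++ suf by simp]
    simp
  rw [hdrop]
  simp only [get_index1_one, hidx]
  simp only [A_fold_eq_gp0, List.nil_append, PySem.List.pyGetD_zero_cons]
  rw [show [(k : Int)] ++ gp ((k : Int) :: idx1 suf ((k : Int) + 1)) ++
      [PySem.List.pyGetD ((k : Int) :: idx1 suf ((k : Int) + 1))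
        ((((k : Int) :: idx1 suf ((k : Int) + 1)).length : Int) - 1) 0]
      = F ((k : Int) :: idx1 suf ((k : Int) + 1)) from A_assemble _ _]
  simp [F]
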